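-- pv_equiv track=rewrite | github.com/hadoopcode/python | data_analysis/vsc/data_load.py | extract_record_base_tda
-- ===== SOURCE A (Python) =====
-- def extract_record_base_tda(line_list):
--     tda_list = list()
--     for i in range(len(line_list)):
--         if line_list[i][:9] == '***TDA***':
--             tda_list.append(i)
--     result = list()
--     for i in range(len(tda_list)-1):
--         result.append(''.join(line_list[tda_list[i]:tda_list[i+1]]))
--     return result
-- ===== SOURCE B (Python) =====
-- def extract_record_base_tda(line_list):
--     result = []
--     buf = None
--     for line in line_list:
--         if line[:9] == '***TDA***':
--             if buf is not None:
--                 result.append(''.join(buf))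
--             buf = [line]
--         elif buf is not None:
--             buf.append(line)
--     return result
-- ===== Notes on version B (the rewrite author's own statement) =====
-- stated objective: simpler
-- what changed: Replaced the two index-based passes (collect marker indices, then re-slice and join between consecutive indices) by a single pass over the lines with a running buffer that is flushed at each marker and never emitted while still open at the end.
import Mathlib
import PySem

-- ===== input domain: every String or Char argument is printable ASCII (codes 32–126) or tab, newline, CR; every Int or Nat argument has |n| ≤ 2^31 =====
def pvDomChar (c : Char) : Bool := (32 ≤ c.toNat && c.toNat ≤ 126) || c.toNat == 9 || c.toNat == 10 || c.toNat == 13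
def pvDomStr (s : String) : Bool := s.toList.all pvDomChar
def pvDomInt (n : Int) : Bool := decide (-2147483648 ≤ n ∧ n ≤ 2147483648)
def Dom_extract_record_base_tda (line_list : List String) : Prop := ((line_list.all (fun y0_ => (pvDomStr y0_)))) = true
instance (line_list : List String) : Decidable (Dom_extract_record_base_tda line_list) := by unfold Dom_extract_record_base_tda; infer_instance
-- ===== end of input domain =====

-- B replaces A's two index-based passes by a single pass with a running buffer flushed at each
-- '***TDA***' marker (the last open buffer is discarded); same return value, simpler decomposition.


-- ===== PORT A =====
-- A's first loop: collect the indices i with line_list[i][:9] == '***TDA***'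
def pvTdaList (line_list : List String) : List Int :=
  (PySem.List.pyRange 0 (PySem.List.len line_list) 1).foldl
    (fun acc i =>
      if PySem.Str.slice (PySem.List.pyGetD line_list i "") none (some 9) == "***TDA***" then
        acc ++ [i]
      else acc) []

def extract_record_base_tda (line_list : List String) : List String :=
  let tda_list := pvTdaList line_list
  (PySem.List.pyRange 0 ((PySem.List.len tda_list) - 1) 1).foldl
    (fun res i =>
      res ++ [PySem.Str.join ""
        (PySem.List.slice line_list (some (PySem.List.pyGetD tda_list i 0))
          (some (PySem.List.pyGetD tda_list (i + 1) 0)))]) []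

-- ===== PORT B =====
-- state = (result, buffer, buffer-is-open); 'buf is None' in Source B is the open flag being false
def pvBStep (st : List String × List String × Bool) (line : String) :
    List String × List String × Bool :=
  if PySem.Str.slice line none (some 9) == "***TDA***" then
    ((if st.2.2 then st.1 ++ [PySem.Str.join "" st.2.1] else st.1), [line], true)
  else if st.2.2 then (st.1, st.2.1 ++ [line], true)
  else st

def extract_record_base_tda_alt (line_list : List String) : List String :=
  (line_list.foldl pvBStep ([], [], false)).1

-- ===== PRECONDITION & SPEC =====
def Spec_extract_record_base_tda (line_list : List String) (out : List String) : Prop := out = extract_record_base_tda_alt line_list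
instance (line_list : List String) (out : List String) : Decidable (Spec_extract_record_base_tda line_list out) := by unfold Spec_extract_record_base_tda; infer_instance

-- ===== CLAIM (what is proved, stated in full; the proofs are below) =====
def Claim_equal_extract_record_base_tda : Prop := ∀ (line_list : List String), Dom_extract_record_base_tda line_list → Spec_extract_record_base_tda line_list (extract_record_base_tda line_list)

-- ===== LEMMAS AND PROOFS =====

-- marker test shared by both ports
def pvMk (s : String) : Bool := PySem.Str.slice s none (some 9) == "***TDA***"

-- positions (as Nats) of the marker lines
def pvP : List String → List Nat
  | [] => []
  | x :: xs => (if pvMk x then [0] else []) ++ (pvP xs).map (· + 1)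

-- the joined segment [a:b) of ll
def pvSeg (ll : List String) (a b : Nat) : String :=
  PySem.Str.join "" ((ll.drop a).take (b - a))

-- segments between consecutive markers
def pvZ (ll : List String) : List String :=
  List.zipWith (pvSeg ll) (pvP ll) (pvP ll).tail

theorem pvSeg_shift (x : String) (xs : List String) (a b : Nat) :
    pvSeg (x :: xs) (a + 1) (b + 1) = pvSeg xs a b := by
  simp [pvSeg]

theorem pvZip_shift (x : String) (xs : List String) (l l' : List Nat) :
    List.zipWith (pvSeg (x :: xs)) (l.map (· + 1)) (l'.map (· + 1)) =
      List.zipWith (pvSeg xs) l l' := by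
  rw [List.zipWith_map]
  have h : (fun a b => pvSeg (x :: xs) (a + 1) (b + 1)) = pvSeg xs := by
    funext a b; exact pvSeg_shift x xs a b
  rw [h]

theorem pvP_not_mk (x : String) (xs : List String) (h : pvMk x = false) :
    pvP (x :: xs) = (pvP xs).map (· + 1) := by
  simp [pvP, h]

theorem pvP_mk (x : String) (xs : List String) (h : pvMk x = true) :
    pvP (x :: xs) = 0 :: (pvP xs).map (· + 1) := by
  simp [pvP, h]

theorem pvZ_not_mk (x : String) (xs : List String) (h : pvMk x = false) :
    pvZ (x :: xs) = pvZ xs := by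
  rw [pvZ, pvP_not_mk x xs h, ← List.map_tail, pvZip_shift x xs, pvZ]

theorem pvZ_mk (x : String) (xs : List String) (h : pvMk x = true) :
    pvZ (x :: xs) =
      match pvP xs with
      | [] => []
      | u :: _ => PySem.Str.join "" ([x] ++ xs.take u) :: pvZ xs := by
  rw [pvZ, pvP_mk x xs h]
  cases hp : pvP xs with
  | nil => simp
  | cons u rest =>
    simp only [List.map_cons, List.tail_cons, List.zipWith_cons_cons]
    have h2 := pvZip_shift x xs (u :: rest) rest
    simp only [List.map_cons] at h2
    rw [h2]
    have h3 : pvZ xs = List.zipWith (pvSeg xs) (u :: rest) rest := by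
      rw [pvZ, hp, List.tail_cons]
    rw [h3]
    all_goals simp [pvSeg, List.take_succ_cons]

-- B's per-state recursions
def pvSegsO (buf : List String) : List String → List String
  | [] => []
  | x :: xs =>
    if pvMk x then PySem.Str.join "" buf :: pvSegsO [x] xs else pvSegsO (buf ++ [x]) xs

def pvSegsC : List String → List String
  | [] => []
  | x :: xs => if pvMk x then pvSegsO [x] xs else pvSegsC xs

theorem pvSegsO_eq (xs : List String) : ∀ buf : List String,
    pvSegsO buf xs =
      match pvP xs with
      | [] => []
      | t :: _ => PySem.Str.join "" (buf ++ xs.take t) :: pvZ xs := by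
  induction xs with
  | nil => intro buf; simp [pvSegsO, pvP]
  | cons x xs ih =>
    intro buf
    by_cases h : pvMk x = true
    · rw [pvP_mk x xs h]
      simp only [pvSegsO, h, if_pos]
      rw [pvZ_mk x xs h, ih [x]]
      cases hp : pvP xs <;> simp
    · have h' : pvMk x = false := by simpa using h
      rw [pvP_not_mk x xs h']
      simp only [pvSegsO, h', Bool.false_eq_true, if_false]
      rw [ih (buf ++ [x]), pvZ_not_mk x xs h']
      cases hp : pvP xs with
      | nil => simp
      | cons t rest => simp

theorem pvSegsC_eq (xs : List String) : pvSegsC xs = pvZ xs := by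
  induction xs with
  | nil => simp [pvSegsC, pvZ, pvP]
  | cons x xs ih =>
    by_cases h : pvMk x = true
    · simp only [pvSegsC, h, if_pos]
      rw [pvSegsO_eq xs [x], pvZ_mk x xs h]
    · have h' : pvMk x = false := by simpa using h
      simp only [pvSegsC, h', Bool.false_eq_true, if_false]
      rw [ih, pvZ_not_mk x xs h']

theorem pvFoldl_open (xs : List String) : ∀ (res buf : List String),
    (xs.foldl pvBStep (res, buf, true)).1 = res ++ pvSegsO buf xs := by
  induction xs with
  | nil => intro res buf; simp [pvSegsO]
  | cons x xs ih =>
    intro res buf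
    by_cases h : pvMk x = true
    · have hm : (PySem.Str.slice x none (some 9) == "***TDA***") = true := h
      have hstep : pvBStep (res, buf, true) x =
          (res ++ [PySem.Str.join "" buf], [x], true) := by
        simp [pvBStep, hm]
      rw [List.foldl_cons, hstep, ih]
      simp [pvSegsO, h]
    · have h' : pvMk x = false := by simpa using h
      have hm : (PySem.Str.slice x none (some 9) == "***TDA***") = false := h'
      have hstep : pvBStep (res, buf, true) x = (res, buf ++ [x], true) := by
        simp [pvBStep, hm]
      rw [List.foldl_cons, hstep, ih]
      simp [pvSegsO, h']

theorem pvFoldl_closed (xs : List String) : ∀ res : List String,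
    (xs.foldl pvBStep (res, [], false)).1 = res ++ pvSegsC xs := by
  induction xs with
  | nil => intro res; simp [pvSegsC]
  | cons x xs ih =>
    intro res
    by_cases h : pvMk x = true
    · have hm : (PySem.Str.slice x none (some 9) == "***TDA***") = true := h
      have hstep : pvBStep (res, [], false) x = (res, [x], true) := by
        simp [pvBStep, hm]
      rw [List.foldl_cons, hstep, pvFoldl_open]
      simp [pvSegsC, h]
    · have h' : pvMk x = false := by simpa using h
      have hm : (PySem.Str.slice x none (some 9) == "***TDA***") = false := h'
      have hstep : pvBStep (res, [], false) x = (res, [], false) := by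
        simp [pvBStep, hm]
      rw [List.foldl_cons, hstep, ih]
      simp [pvSegsC, h']

theorem pvAlt_eq_Z (ll : List String) : extract_record_base_tda_alt ll = pvZ ll := by
  rw [extract_record_base_tda_alt, pvFoldl_closed ll [], pvSegsC_eq]
  simp

-- A's first pass computes the marker positions
theorem pvFilter_eq_P (ll : List String) :
    (List.range ll.length).filter (fun k => pvMk (ll.getD k "")) = pvP ll := by
  induction ll with
  | nil => simp [pvP]
  | cons x xs ih =>
    rw [List.length_cons, List.range_succ_eq_map]
    simp only [List.filter_cons]
    rw [List.filter_map]
    simp only [Function.comp_def, Nat.succ_eq_add_one]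
    have h1 : ∀ k : Nat, (x :: xs).getD (k + 1) "" = xs.getD k "" := by
      intro k; rfl
    simp only [h1, ih, pvP, List.getD_cons_zero]
    by_cases h : pvMk x = true <;> simp [h]

theorem pvFlatMapSingle {α β : Type} (f : α → β) (l : List α) :
    l.flatMap (fun x => [f x]) = l.map f := by
  induction l with
  | nil => rfl
  | cons a l ih => simp [ih]

theorem pvTda_eq (ll : List String) :
    pvTdaList ll = (pvP ll).map (fun (k : Nat) => (k : Int)) := by
  rw [pvTdaList,
    PySem.List.foldl_append_if
      (fun i => PySem.Str.slice (PySem.List.pyGetD ll i "") none (some 9) == "***TDA***")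
      (fun i => i)]
  have hlen : PySem.List.len ll = ((ll.length : Nat) : Int) := by simp [PySem.List.len]
  rw [hlen, PySem.List.pyRange_zero_natCast, List.filter_map]
  have hq : ((fun i => PySem.Str.slice (PySem.List.pyGetD ll i "") none (some 9) == "***TDA***")
        ∘ (fun (k : Nat) => (k : Int))) = (fun k : Nat => pvMk (ll.getD k "")) := by
    funext k
    simp only [Function.comp_apply]
    rw [PySem.List.pyGetD_of_nonneg ll "" (by positivity)]
    simp [pvMk]
  rw [hq, pvFilter_eq_P]
  simp

theorem pvA_eq_Z (ll : List String) : extract_record_base_tda ll = pvZ ll := by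
  rw [extract_record_base_tda]
  simp only [pvTda_eq]
  rw [PySem.List.foldl_append_eq_flatMap, pvFlatMapSingle]
  set p := pvP ll with hp
  have hlen : PySem.List.len (p.map (fun (k : Nat) => (k : Int))) = ((p.length : Nat) : Int) := by
    simp [PySem.List.len]
  rw [hlen]
  have hrange : PySem.List.pyRange 0 ((p.length : Int) - 1) 1 =
      (List.range (p.length - 1)).map (fun (k : Nat) => (k : Int)) := by
    rw [PySem.List.pyRange_one]
    have h0 : (((p.length : Int) - 1) - 0).toNat = p.length - 1 := by omega
    rw [h0]
    simp
  rw [hrange, List.map_map]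
  apply List.ext_getElem
  · simp only [List.nil_append, List.length_map, List.length_range, pvZ, ← hp,
      List.length_zipWith, List.length_tail]
    omega
  · intro i h1 h2
    simp only [List.nil_append, List.getElem_map, List.getElem_range, Function.comp_apply]
    have hi : i < p.length - 1 := by simpa using h1
    have hg1 : PySem.List.pyGetD (p.map (fun (k : Nat) => (k : Int))) (i : Int) 0 =
        (p[i]'(by omega) : Int) := by
      rw [PySem.List.pyGetD_eq_getElem _ _ (by positivity) (by simp; omega)]
      simp
    have hg2 : PySem.List.pyGetD (p.map (fun (k : Nat) => (k : Int))) ((i : Int) + 1) 0 =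
        (p[i+1]'(by omega) : Int) := by
      have hc : ((i : Int) + 1) = ((i + 1 : Nat) : Int) := by push_cast; ring
      rw [hc, PySem.List.pyGetD_eq_getElem _ _ (by positivity) (by simp; omega)]
      simp
    rw [hg1, hg2, PySem.List.slice_natCast]
    simp only [pvZ, ← hp, List.getElem_zipWith, List.getElem_tail]
    simp [pvSeg]

-- ===== VERDICT (by name: the statement is the Claim_ definition above) =====
theorem extract_record_base_tda_spec : Claim_equal_extract_record_base_tda := by
  intro ll _
  unfold Spec_extract_record_base_tda
  rw [pvA_eq_Z, pvAlt_eq_Z]
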